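-- pv_equiv track=rewrite | github.com/mkmk10k/rift | python/tts_server.py | get_first_segment
-- ===== SOURCE A (Python) =====
-- def get_first_segment(text: str, max_chars: int = 25) -> tuple:
--     """
--     Extract a short first segment for fast initial audio delivery.
--
--     Returns (first_segment, remaining_text) where first_segment is guaranteed
--     to be short enough for fast synthesis (~150ms instead of 500ms+).
--
--     Strategy:
--     1. If punctuation (.!?,;:) appears within max_chars, split there
--     2. Otherwise, split at the last word boundary before max_chars
--     3. If text is already short, return (None, text) - no split needed
--     """
--     if len(text) <= max_chars:
--         return None, text
--
--     # Look for natural break point within max_chars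
--     for i, char in enumerate(text[:max_chars]):
--         if char in '.!?,;:':
--             # Include the punctuation in first segment
--             first = text[:i+1].strip()
--             rest = text[i+1:].strip()
--             if first:  # Ensure we got something
--                 return first, rest
--
--     # No punctuation found - split at last word boundary before max_chars
--     space_idx = text.rfind(' ', 0, max_chars)
--     if space_idx > 10:  # Found reasonable word boundary (at least 10 chars)
--         first = text[:space_idx].strip()
--         rest = text[space_idx:].strip()
--         return first, rest
--
--     # Text has no spaces in first max_chars - just take the whole first "word"
--     # This is rare but handles edge cases
--     return None, text
-- ===== SOURCE B (Python) =====
-- def get_first_segment(text: str, max_chars: int = 25) -> tuple: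
--     if len(text) <= max_chars:
--         return None, text
--     prefix = text[:max_chars]
--     candidates = [j for j in (prefix.find(p) for p in '.!?,;:') if j != -1]
--     if candidates:
--         i = min(candidates)
--         return text[:i+1].strip(), text[i+1:].strip()
--     space_idx = text.rfind(' ', 0, max_chars)
--     if space_idx > 10:
--         return text[:space_idx].strip(), text[space_idx:].strip()
--     return None, text
-- ===== Notes on version B (the rewrite author's own statement) =====
-- stated objective: idiomatic
-- what changed: Replaces A's position-by-position scan of text[:max_chars] for a punctuation character by per-delimiter first-occurrence searches (find for each of '.!?,;:'), taking the minimum found index as the split point; the word-boundary fallback is unchanged.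
import Mathlib
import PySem

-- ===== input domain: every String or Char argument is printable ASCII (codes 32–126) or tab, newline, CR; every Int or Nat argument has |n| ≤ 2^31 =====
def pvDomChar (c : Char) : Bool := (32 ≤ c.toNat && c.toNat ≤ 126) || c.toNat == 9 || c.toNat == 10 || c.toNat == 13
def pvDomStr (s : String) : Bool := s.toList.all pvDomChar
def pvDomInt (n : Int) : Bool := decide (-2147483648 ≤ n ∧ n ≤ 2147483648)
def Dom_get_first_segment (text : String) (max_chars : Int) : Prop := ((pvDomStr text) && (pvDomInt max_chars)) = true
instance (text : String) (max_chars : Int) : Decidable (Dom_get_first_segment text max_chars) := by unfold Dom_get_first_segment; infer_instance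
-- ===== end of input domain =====

-- B replaces A's position-by-position punctuation scan with per-delimiter first-occurrence
-- searches (find) whose minimum is the split index; the word-boundary fallback is unchanged
-- (objective: idiomatic; same asymptotic cost).

-- ===== PORT A =====
-- '.!?,;:' as a character list (membership test `char in '.!?,;:'`)
def pvPuncts : List Char := ['.', '!', '?', ',', ';', ':']

-- the `for i, char in enumerate(text[:max_chars])` loop with early return
def pvLoopA (text : String) (pre : List Char) (i : Nat) : Option (Option String × String) :=
  match pre with
  | [] => none
  | c :: rest =>
    if c ∈ pvPuncts then
      let first := PySem.Str.strip (PySem.Str.slice text none (some ((i : Int) + 1)))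
      let rst := PySem.Str.strip (PySem.Str.slice text (some ((i : Int) + 1)) none)
      if first ≠ "" then some (some first, rst) else pvLoopA text rest (i + 1)
    else pvLoopA text rest (i + 1)

def get_first_segment (text : String) (max_chars : Int) : Option String × String :=
  if PySem.Str.len text ≤ max_chars then (none, text)
  else
    match pvLoopA text (PySem.Str.slice text none (some max_chars)).toList 0 with
    | some r => r
    | none =>
      let space_idx := PySem.Str.rfindFrom text " " 0 (some max_chars)
      if space_idx > 10 then
        (some (PySem.Str.strip (PySem.Str.slice text none (some space_idx))),
         PySem.Str.strip (PySem.Str.slice text (some space_idx) none))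
      else (none, text)

-- ===== PORT B =====
def get_first_segment_alt (text : String) (max_chars : Int) : Option String × String :=
  if PySem.Str.len text ≤ max_chars then (none, text)
  else
    let pre := PySem.Str.slice text none (some max_chars)
    let candidates := (pvPuncts.map (fun p => PySem.Str.find pre (String.ofList [p]))).filter (fun j => j != -1)
    match candidates.min? with
    | some i =>
      (some (PySem.Str.strip (PySem.Str.slice text none (some (i + 1)))),
       PySem.Str.strip (PySem.Str.slice text (some (i + 1)) none))
    | none =>
      let space_idx := PySem.Str.rfindFrom text " " 0 (some max_chars)
      if space_idx > 10 then
        (some (PySem.Str.strip (PySem.Str.slice text none (some space_idx))),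
         PySem.Str.strip (PySem.Str.slice text (some space_idx) none))
      else (none, text)

-- ===== PRECONDITION & SPEC =====
def Spec_get_first_segment (text : String) (max_chars : Int) (out : Option String × String) : Prop := out = get_first_segment_alt text max_chars
instance (text : String) (max_chars : Int) (out : Option String × String) : Decidable (Spec_get_first_segment text max_chars out) := by unfold Spec_get_first_segment; infer_instance

-- ===== CLAIM (what is proved, stated in full; the proofs are below) =====
def Claim_equal_get_first_segment : Prop := ∀ (text : String) (max_chars : Int), Dom_get_first_segment text max_chars → Spec_get_first_segment text max_chars (get_first_segment text max_chars)

-- ===== LEMMAS AND PROOFS =====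

lemma pv_singleton_prefix_iff (p : Char) (s : List Char) : [p] <+: s ↔ s.head? = some p := by
  constructor
  · rintro ⟨t, rfl⟩; rfl
  · intro h
    cases s with
    | nil => simp at h
    | cons a t => simp at h; subst h; exact ⟨t, rfl⟩

lemma pv_slice_none_prefix (xs : List Char) (b : Int) : PySem.List.slice xs none (some b) <+: xs := by
  by_cases hb : 0 ≤ b
  · rw [PySem.List.slice_to xs hb]; exact List.take_prefix _ _
  · have hk : 0 < (-b).toNat := by omega
    have hb' : b = -(((-b).toNat : Nat) : Int) := by omega
    rw [hb']
    rw [PySem.List.slice_to_neg_natCast xs _ hk]; exact List.take_prefix _ _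

-- a character of l that is not whitespace survives strip
lemma pv_strip_ne_nil {c : Char} {l : List Char} (hc : c ∈ l)
    (hs : PySem.Chars.isspace c = false) : PySem.Chars.strip l ≠ [] := by
  have step : ∀ {m : List Char}, c ∈ m → c ∈ m.dropWhile PySem.Chars.isspace := by
    intro m hm
    have hsplit := List.takeWhile_append_dropWhile (p := PySem.Chars.isspace) (l := m)
    rcases List.mem_append.mp (hsplit ▸ hm) with h | h
    · exact absurd (List.mem_takeWhile_imp h) (by simp [hs])
    · exact h
  have h1 : c ∈ PySem.Chars.lstrip l := step hc
  have h2 : c ∈ PySem.Chars.strip l := by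
    unfold PySem.Chars.strip PySem.Chars.rstrip
    exact List.mem_reverse.mpr (step (List.mem_reverse.mpr h1))
  exact List.ne_nil_of_mem h2

-- Chars.find of a single character is its first index (or -1)
lemma pv_find_singleton (s : List Char) (p : Char) :
    PySem.Chars.find s [p] = ((s.findIdx? (fun c => c == p)).map (fun k => (k : Int))).getD (-1) := by
  cases h : s.findIdx? (fun c => c == p) with
  | none =>
    show PySem.Chars.find s [p] = -1
    rw [PySem.Chars.find_eq_neg_one_iff]
    rintro ⟨t1, t2, rfl⟩
    have : p ∈ t1 ++ [p] ++ t2 := by simp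
    have := List.findIdx?_eq_none_iff.mp h p this
    simp at this
  | some k =>
    show PySem.Chars.find s [p] = (k : Int)
    obtain ⟨hk, hpk, hmin⟩ := List.findIdx?_eq_some_iff_getElem.mp h
    have hpk' : s[k] = p := by simpa using hpk
    have hprek : [p] <+: s.drop k := by
      rw [pv_singleton_prefix_iff, List.head?_drop]
      simp [List.getElem?_eq_getElem hk, hpk']
    have hinf : [p] <:+: s := hprek.isInfix.trans (List.drop_suffix k s).isInfix
    have hge : 0 ≤ PySem.Chars.find s [p] := (PySem.Chars.find_nonneg_iff s [p]).mpr hinf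
    obtain ⟨hpre, hmin'⟩ := PySem.Chars.find_spec hge
    set n := (PySem.Chars.find s [p]).toNat with hn
    have hsn : s[n]? = some p := by
      rw [← List.head?_drop]
      exact (pv_singleton_prefix_iff p _).mp hpre
    have hnlt : n < s.length := (List.getElem?_eq_some_iff.mp hsn).1
    have hkn : ¬ n < k := by
      intro hlt
      have := hmin n hlt
      rw [List.getElem?_eq_getElem hnlt] at hsn
      simp at hsn
      simp [hsn] at this
    have hnk : ¬ k < n := fun hlt => hmin' k hlt hprek
    have : n = k := by omega
    omega

-- the minimum of the per-delimiter first occurrences is the first index with a delimiter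
lemma pv_candidates_eq (pre : String) :
    ((pvPuncts.map (fun p => PySem.Str.find pre (String.ofList [p]))).filter (fun j => j != -1)).min?
      = (pre.toList.findIdx? (fun c => decide (c ∈ pvPuncts))).map (fun k => (k : Int)) := by
  have hfind : ∀ p : Char, PySem.Str.find pre (String.ofList [p])
      = ((pre.toList.findIdx? (fun c => c == p)).map (fun k => (k : Int))).getD (-1) := by
    intro p
    rw [PySem.Str.find_eq]
    simpa using pv_find_singleton pre.toList p
  set s := pre.toList with hsdef
  cases h : s.findIdx? (fun c => decide (c ∈ pvPuncts)) with
  | none =>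
    show _ = none
    rw [List.min?_eq_none_iff, List.filter_eq_nil_iff]
    intro a ha
    obtain ⟨p, hp, rfl⟩ := List.mem_map.mp ha
    have hnp : s.findIdx? (fun c => c == p) = none := by
      rw [List.findIdx?_eq_none_iff]
      intro x hx
      have := List.findIdx?_eq_none_iff.mp h x hx
      simp only [decide_eq_false_iff_not] at this
      simp only [beq_eq_false_iff_ne, ne_eq]
      rintro rfl; exact this hp
    rw [hfind p, hnp]
    simp
  | some k =>
    obtain ⟨hk, hpk, hmin⟩ := List.findIdx?_eq_some_iff_getElem.mp h
    have hpkmem : s[k] ∈ pvPuncts := by simpa using hpk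
    show _ = some (k : Int)
    rw [List.min?_eq_some_iff]
    constructor
    · -- (k : Int) is a candidate: finds s[k]
      rw [List.mem_filter]
      constructor
      · refine List.mem_map.mpr ⟨s[k], hpkmem, ?_⟩
        rw [hfind]
        have hidx : s.findIdx? (fun c => c == s[k]) = some k := by
          rw [List.findIdx?_eq_some_iff_getElem]
          refine ⟨hk, by simp, ?_⟩
          intro j hj
          have hnj : ¬ (s[j] ∈ pvPuncts) := by simpa using hmin j hj
          have hne : ¬ (s[j] = s[k]) := fun hEq => hnj (by rw [hEq]; exact hpkmem)
          simpa using hne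
        rw [hidx]; simp
      · simp only [bne_iff_ne, ne_eq]
        omega
    · -- every candidate is ≥ k
      intro b hb
      obtain ⟨hbm, hbne⟩ := List.mem_filter.mp hb
      obtain ⟨p, hp, rfl⟩ := List.mem_map.mp hbm
      rw [hfind] at hbne ⊢
      cases hfp : s.findIdx? (fun c => c == p) with
      | none => rw [hfp] at hbne; simp at hbne
      | some m =>
        obtain ⟨hm, hpm, _⟩ := List.findIdx?_eq_some_iff_getElem.mp hfp
        have hsm : s[m] = p := by simpa using hpm
        have hmk : ¬ m < k := by
          intro hlt
          have := hmin m hlt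
          simp [hsm, hp] at this
        show (k : Int) ≤ (m : Int)
        exact_mod_cast Nat.le_of_not_lt hmk

-- punctuation characters are not whitespace
lemma pv_puncts_not_space {c : Char} (hc : c ∈ pvPuncts) : PySem.Chars.isspace c = false := by
  fin_cases hc <;> decide

-- A's scan returns the split at the first delimiter index (the inner `if first` guard always passes)
set_option maxHeartbeats 1000000 in
lemma pv_loopA_spec (text : String) : ∀ (pre : List Char) (i : Nat),
    pre <+: text.toList.drop i →
    pvLoopA text pre i = (pre.findIdx? (fun c => decide (c ∈ pvPuncts))).map (fun k =>
      (some (PySem.Str.strip (PySem.Str.slice text none (some (((i + k : Nat) : Int) + 1)))),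
       PySem.Str.strip (PySem.Str.slice text (some (((i + k : Nat) : Int) + 1)) none))) := by
  intro pre
  induction pre with
  | nil => intro i _; simp [pvLoopA]
  | cons c rest ih =>
    intro i h
    have hc : text.toList[i]? = some c := by
      rw [← List.head?_drop]
      obtain ⟨t, ht⟩ := h
      rw [← ht]; rfl
    have hrest : rest <+: text.toList.drop (i + 1) := by
      obtain ⟨t, ht⟩ := h
      have : (text.toList.drop i).tail = text.toList.drop (i + 1) := by
        rw [List.tail_drop]
      rw [← this, ← ht]
      exact ⟨t, rfl⟩
    simp only [pvLoopA, List.findIdx?_cons]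
    by_cases hmem : c ∈ pvPuncts
    · have hilt : i < text.toList.length := (List.getElem?_eq_some_iff.mp hc).1
      have hguard : PySem.Str.strip (PySem.Str.slice text none (some ((i : Int) + 1))) ≠ "" := by
        intro he
        have htl : (PySem.Str.strip (PySem.Str.slice text none (some ((i : Int) + 1)))).toList = [] := by
          rw [he]; rfl
        rw [PySem.Str.toList_strip, PySem.Str.toList_slice] at htl
        have hsl : PySem.Chars.slice text.toList none (some ((i : Int) + 1)) = text.toList.take (i + 1) := by
          rw [PySem.Chars.slice_eq_listSlice]
          have : ((i : Int) + 1) = (((i + 1 : Nat) : Int)) := by push_cast; ring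
          rw [this, PySem.List.slice_to_natCast]
        rw [hsl] at htl
        have hcmem : c ∈ text.toList.take (i + 1) := by
          have : (text.toList.take (i + 1))[i]? = some c := by
            rw [List.getElem?_take_of_lt (by omega)]; exact hc
          exact List.mem_of_getElem? this
        exact pv_strip_ne_nil hcmem (pv_puncts_not_space hmem) htl
      rw [if_pos hmem]
      rw [if_pos hguard]
      have hdt : decide (c ∈ pvPuncts) = true := by simp [hmem]
      rw [hdt]
      simp
    · rw [if_neg hmem]
      rw [ih (i + 1) hrest]
      have hd : (decide (c ∈ pvPuncts)) = false := by simp [hmem]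
      rw [hd]
      simp only [Bool.false_eq_true, if_false]
      generalize List.findIdx? (fun c => decide (c ∈ pvPuncts)) rest = o
      cases o with
      | none => simp only [Option.map_none]
      | some k =>
        simp only [Option.map_some]
        have he : i + 1 + k = i + (k + 1) := by omega
        rw [he]

lemma pv_main (text : String) (max_chars : Int) :
    get_first_segment text max_chars = get_first_segment_alt text max_chars := by
  unfold get_first_segment get_first_segment_alt
  by_cases hle : PySem.Str.len text ≤ max_chars
  · rw [if_pos hle, if_pos hle]
  · rw [if_neg hle, if_neg hle]
    have hpre : (PySem.Str.slice text none (some max_chars)).toList <+: text.toList.drop 0 := by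
      rw [List.drop_zero, PySem.Str.toList_slice, PySem.Chars.slice_eq_listSlice]
      exact pv_slice_none_prefix text.toList max_chars
    rw [pv_loopA_spec text _ 0 hpre]
    simp only []
    rw [pv_candidates_eq]
    cases h : (PySem.Str.slice text none (some max_chars)).toList.findIdx? (fun c => decide (c ∈ pvPuncts)) with
    | none => simp
    | some k => simp

-- ===== VERDICT (by name: the statement is the Claim_ definition above) =====
theorem get_first_segment_spec : Claim_equal_get_first_segment := by
  intro text max_chars _
  unfold Spec_get_first_segment
  exact pv_main text max_chars
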